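-- pv_equiv track=rewrite | github.com/tanmay-delhikar/satellite-image-analysis-ml | 1-dataset-sentinel2-satellite/preprocessor.py | band_sorter_l8
-- ===== SOURCE A (Python) =====
-- def band_sorter_l8(list_temp):
--     sorted_list = []
--     for element in list_temp:
--         if element.endswith('_B1.tif'):
--             sorted_list.append(element)
--     for element in list_temp:
--         if element.endswith('_B2.tif'):
--             sorted_list.append(element)
--     for element in list_temp:
--         if element.endswith('_B3.tif'):
--             sorted_list.append(element)
--     for element in list_temp:
--         if element.endswith('_B4.tif'):
--             sorted_list.append(element)
--     for element in list_temp: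
--         if element.endswith('_B5.tif'):
--             sorted_list.append(element)
--     for element in list_temp:
--         if element.endswith('_B6.tif'):
--             sorted_list.append(element)
--     for element in list_temp:
--         if element.endswith('_B7.tif'):
--             sorted_list.append(element)
--     for element in list_temp:
--         if element.endswith('_B8.tif'):
--             sorted_list.append(element)
--     for element in list_temp:
--         if element.endswith('_B9.tif'):
--             sorted_list.append(element)
--     for element in list_temp:
--         if element.endswith('_B10.tif'):
--             sorted_list.append(element)
--     for element in list_temp:
--         if element.endswith('_B11.tif'):
--             sorted_list.append(element)
--     for element in list_temp:
--         if element.endswith('_BQA.tif'):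
--             sorted_list.append(element)
--     return sorted_list
-- ===== SOURCE B (Python) =====
-- SUFFIXES = ['_B1.tif', '_B2.tif', '_B3.tif', '_B4.tif', '_B5.tif', '_B6.tif',
--             '_B7.tif', '_B8.tif', '_B9.tif', '_B10.tif', '_B11.tif', '_BQA.tif']
--
-- def _rank(e):
--     for i, s in enumerate(SUFFIXES):
--         if e.endswith(s):
--             return i
--     return len(SUFFIXES)
--
-- def band_sorter_l8(list_temp):
--     matched = [e for e in list_temp if _rank(e) < len(SUFFIXES)]
--     return sorted(matched, key=_rank)
-- ===== Notes on version B (the rewrite author's own statement) =====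
-- stated objective: idiomatic
-- what changed: A makes 12 separate passes over the list (one per band suffix) appending matches; B assigns each filename a rank (index of the band suffix it ends with), filters once, and uses one stable sort by rank.
import Mathlib
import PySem

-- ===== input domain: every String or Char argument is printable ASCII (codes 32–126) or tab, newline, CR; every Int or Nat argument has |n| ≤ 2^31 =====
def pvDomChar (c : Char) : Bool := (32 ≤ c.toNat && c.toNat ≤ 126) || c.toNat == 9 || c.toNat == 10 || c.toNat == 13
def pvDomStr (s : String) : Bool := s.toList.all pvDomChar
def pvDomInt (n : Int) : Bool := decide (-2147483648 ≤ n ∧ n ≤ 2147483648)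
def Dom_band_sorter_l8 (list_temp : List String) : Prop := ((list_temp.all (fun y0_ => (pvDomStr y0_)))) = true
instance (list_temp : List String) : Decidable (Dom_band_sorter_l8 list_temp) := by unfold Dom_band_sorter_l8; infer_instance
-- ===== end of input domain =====

-- B replaces A's twelve filtering passes by a single filter plus one stable sort keyed by band rank (idiomatic; return value only, no mutation involved).

-- ===== PORT A =====
def band_sorter_l8 (list_temp : List String) : List String :=
  let s := list_temp.foldl (fun acc e => if PySem.Str.endswith e "_B1.tif" then acc ++ [e] else acc) []
  let s := list_temp.foldl (fun acc e => if PySem.Str.endswith e "_B2.tif" then acc ++ [e] else acc) s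
  let s := list_temp.foldl (fun acc e => if PySem.Str.endswith e "_B3.tif" then acc ++ [e] else acc) s
  let s := list_temp.foldl (fun acc e => if PySem.Str.endswith e "_B4.tif" then acc ++ [e] else acc) s
  let s := list_temp.foldl (fun acc e => if PySem.Str.endswith e "_B5.tif" then acc ++ [e] else acc) s
  let s := list_temp.foldl (fun acc e => if PySem.Str.endswith e "_B6.tif" then acc ++ [e] else acc) s
  let s := list_temp.foldl (fun acc e => if PySem.Str.endswith e "_B7.tif" then acc ++ [e] else acc) s
  let s := list_temp.foldl (fun acc e => if PySem.Str.endswith e "_B8.tif" then acc ++ [e] else acc) s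
  let s := list_temp.foldl (fun acc e => if PySem.Str.endswith e "_B9.tif" then acc ++ [e] else acc) s
  let s := list_temp.foldl (fun acc e => if PySem.Str.endswith e "_B10.tif" then acc ++ [e] else acc) s
  let s := list_temp.foldl (fun acc e => if PySem.Str.endswith e "_B11.tif" then acc ++ [e] else acc) s
  let s := list_temp.foldl (fun acc e => if PySem.Str.endswith e "_BQA.tif" then acc ++ [e] else acc) s
  s

-- ===== PORT B =====
def pvSuffixes : List String :=
  ["_B1.tif", "_B2.tif", "_B3.tif", "_B4.tif", "_B5.tif", "_B6.tif",
   "_B7.tif", "_B8.tif", "_B9.tif", "_B10.tif", "_B11.tif", "_BQA.tif"]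

-- _rank in Source B: index of the first suffix e ends with, len(SUFFIXES) if none
def pvRank (e : String) : Nat := pvSuffixes.findIdx (fun s => PySem.Str.endswith e s)

def band_sorter_l8_alt (list_temp : List String) : List String :=
  PySem.List.sorted (list_temp.filter (fun e => decide (pvRank e < pvSuffixes.length))) pvRank false

-- ===== PRECONDITION & SPEC =====
def Spec_band_sorter_l8 (list_temp : List String) (out : List String) : Prop := out = band_sorter_l8_alt list_temp
instance (list_temp : List String) (out : List String) : Decidable (Spec_band_sorter_l8 list_temp out) := by unfold Spec_band_sorter_l8; infer_instance

-- ===== CLAIM (what is proved, stated in full; the proofs are below) =====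
def Claim_equal_band_sorter_l8 : Prop := ∀ (list_temp : List String), Dom_band_sorter_l8 list_temp → Spec_band_sorter_l8 list_temp (band_sorter_l8 list_temp)

-- ===== LEMMAS AND PROOFS =====

-- generic: stable sort by a Nat key with bounded range = concatenation of the key buckets in order
def pvBuckets {α : Type} (key : α → Nat) (n : Nat) (ys : List α) : List α :=
  (List.range n).flatMap (fun i => ys.filter (fun x => decide (key x = i)))

theorem pv_flatMap_congr {α β : Type} {l : List α} {f g : α → List β}
    (h : ∀ a ∈ l, f a = g a) : l.flatMap f = l.flatMap g := by
  induction l with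
  | nil => rfl
  | cons a t ih =>
    simp only [List.flatMap_cons, h a (by simp), ih fun a ha => h a (by simp [ha])]

theorem pv_insertBy_append {α : Type} (before : α → α → Bool) (x : α) (l1 l2 : List α)
    (h : ∀ b ∈ l1, before x b = false) :
    PySem.List.insertBy before x (l1 ++ l2) = l1 ++ PySem.List.insertBy before x l2 := by
  induction l1 with
  | nil => simp
  | cons b t ih =>
    simp [PySem.List.insertBy, h b (by simp), ih fun c hc => h c (by simp [hc])]

theorem pv_insertBy_all {α : Type} (before : α → α → Bool) (x : α) (l2 : List α)
    (h : ∀ b ∈ l2, before x b = true) :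
    PySem.List.insertBy before x l2 = x :: l2 := by
  cases l2 with
  | nil => simp [PySem.List.insertBy]
  | cons b t => simp [PySem.List.insertBy, h b (by simp)]

theorem pv_step {α : Type} (key : α → Nat) (n : Nat) (ys : List α) (x : α) (hx : key x < n) :
    PySem.List.insertBy (fun a b => decide (key a < key b)) x (pvBuckets key n ys)
      = pvBuckets key n (ys ++ [x]) := by
  have hn : n = (key x + 1) + (n - (key x + 1)) := by omega
  unfold pvBuckets
  rw [hn, List.range_add, List.flatMap_append, List.flatMap_append]
  rw [pv_insertBy_append _ x _ _ (by
    intro b hb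
    simp only [List.mem_flatMap, List.mem_range, List.mem_filter, decide_eq_true_eq] at hb
    obtain ⟨i, hi, _, hk⟩ := hb
    simp only [decide_eq_false_iff_not, not_lt]
    omega)]
  rw [pv_insertBy_all _ x _ (by
    intro b hb
    simp only [List.mem_flatMap, List.mem_map, List.mem_range, List.mem_filter,
      decide_eq_true_eq] at hb
    obtain ⟨i, ⟨j, _, hj⟩, _, hk⟩ := hb
    simp only [decide_eq_true_eq]
    omega)]
  have h2 : ((List.range (n - (key x + 1))).map (fun j => key x + 1 + j)).flatMap
        (fun i => (ys ++ [x]).filter (fun y => decide (key y = i)))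
      = ((List.range (n - (key x + 1))).map (fun j => key x + 1 + j)).flatMap
        (fun i => ys.filter (fun y => decide (key y = i))) := by
    apply pv_flatMap_congr
    intro i hi
    simp only [List.mem_map, List.mem_range] at hi
    obtain ⟨j, _, hj⟩ := hi
    rw [List.filter_append]
    have : [x].filter (fun y => decide (key y = i)) = [] := by
      simp only [List.filter_cons, List.filter_nil, decide_eq_true_eq]
      rw [if_neg (by omega)]
    rw [this, List.append_nil]
  rw [h2]
  have h1 : (List.range (key x + 1)).flatMap
        (fun i => (ys ++ [x]).filter (fun y => decide (key y = i)))
      = (List.range (key x + 1)).flatMap (fun i => ys.filter (fun y => decide (key y = i))) ++ [x] := by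
    rw [List.range_succ, List.flatMap_append, List.flatMap_append]
    have hmid : (List.range (key x)).flatMap
          (fun i => (ys ++ [x]).filter (fun y => decide (key y = i)))
        = (List.range (key x)).flatMap (fun i => ys.filter (fun y => decide (key y = i))) := by
      apply pv_flatMap_congr
      intro i hi
      simp only [List.mem_range] at hi
      rw [List.filter_append]
      have : [x].filter (fun y => decide (key y = i)) = [] := by
        simp only [List.filter_cons, List.filter_nil, decide_eq_true_eq]
        rw [if_neg (by omega)]
      rw [this, List.append_nil]
    rw [hmid]
    simp [List.filter_append, List.append_assoc]
  rw [h1]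
  simp [List.append_assoc]

theorem pv_sorted_buckets {α : Type} (key : α → Nat) (n : Nat) (xs : List α)
    (h : ∀ x ∈ xs, key x < n) :
    PySem.List.sorted xs key false = pvBuckets key n xs := by
  rw [PySem.List.sorted_eq_foldl_insertBy]
  have aux : ∀ (ts ys : List α), (∀ x ∈ ts, key x < n) →
      ts.foldl (fun acc x => PySem.List.insertBy (fun a b => decide (key a < key b)) x acc)
        (pvBuckets key n ys) = pvBuckets key n (ys ++ ts) := by
    intro ts
    induction ts with
    | nil => intro ys _; simp
    | cons x t ih =>
      intro ys h
      simp only [List.foldl_cons]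
      rw [pv_step key n ys x (h x (by simp))]
      rw [ih (ys ++ [x]) fun y hy => h y (by simp [hy])]
      simp
  have h0 : pvBuckets key n ([] : List α) = [] := by
    simp [pvBuckets]
  have := aux xs []
  rw [h0] at this
  simpa using this h

-- the twelve suffixes are pairwise not suffixes of one another
theorem pv_incompat : ∀ s1 ∈ pvSuffixes, ∀ s2 ∈ pvSuffixes, s1 ≠ s2 →
    ¬ (s1.toList <:+ s2.toList) := by decide

theorem pv_suffix_of_suffix_le {α : Type} {l1 l2 l3 : List α}
    (h1 : l1 <:+ l3) (h2 : l2 <:+ l3) (h : l1.length ≤ l2.length) : l1 <:+ l2 := by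
  rw [← List.reverse_prefix] at h1 h2 ⊢
  exact List.prefix_of_prefix_length_le h1 h2 (by simpa using h)

theorem pv_endswith_unique (e s1 s2 : String) (h1 : s1 ∈ pvSuffixes) (h2 : s2 ∈ pvSuffixes)
    (he1 : PySem.Str.endswith e s1 = true) (he2 : PySem.Str.endswith e s2 = true) : s1 = s2 := by
  by_contra hne
  rw [PySem.Str.endswith_eq, PySem.Chars.endswith_iff] at he1 he2
  rcases le_total s1.toList.length s2.toList.length with hle | hle
  · exact pv_incompat s1 h1 s2 h2 hne (pv_suffix_of_suffix_le he1 he2 hle)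
  · exact pv_incompat s2 h2 s1 h1 (Ne.symm hne) (pv_suffix_of_suffix_le he2 he1 hle)

theorem pv_rank_eq_of_endswith (e : String) (i : Nat) (hi : i < pvSuffixes.length)
    (he : PySem.Str.endswith e pvSuffixes[i] = true) : pvRank e = i := by
  unfold pvRank
  rw [List.findIdx_eq hi]
  refine ⟨he, fun j hj => ?_⟩
  rw [Bool.eq_false_iff]
  intro hb'
  have hji : j < pvSuffixes.length := by omega
  have := pv_endswith_unique e pvSuffixes[j] pvSuffixes[i]
    (List.getElem_mem hji) (List.getElem_mem hi) hb' he
  have hnd : pvSuffixes.Nodup := by decide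
  exact absurd (List.Nodup.getElem_inj_iff hnd |>.mp this) (by omega)

theorem pv_endswith_of_rank_eq (e : String) (i : Nat) (hi : i < pvSuffixes.length)
    (hr : pvRank e = i) : PySem.Str.endswith e pvSuffixes[i] = true := by
  unfold pvRank at hr
  exact ((List.findIdx_eq hi).mp hr).1

theorem pv_filter_bridge (l : List String) (i : Nat) (hi : i < pvSuffixes.length) :
    l.filter (fun e => decide (pvRank e = i) && decide (pvRank e < 12))
      = l.filter (fun e => PySem.Str.endswith e pvSuffixes[i]) := by
  apply List.filter_congr
  intro e _
  by_cases he : PySem.Str.endswith e pvSuffixes[i] = true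
  · have hr := pv_rank_eq_of_endswith e i hi he
    have hi12 : i < 12 := by simpa using hi
    rw [he]
    simp [hr, hi12]
  · have hr : ¬ pvRank e = i := fun h => he (pv_endswith_of_rank_eq e i hi h)
    simp only [Bool.not_eq_true] at he
    rw [he]
    simp [hr]

-- ===== VERDICT (by name: the statement is the Claim_ definition above) =====
theorem band_sorter_l8_spec : Claim_equal_band_sorter_l8 := by
  intro l _
  unfold Spec_band_sorter_l8 band_sorter_l8 band_sorter_l8_alt
  rw [pv_sorted_buckets pvRank pvSuffixes.length _ (by
    intro x hx
    simp only [List.mem_filter, decide_eq_true_eq] at hx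
    exact hx.2)]
  have b0 := pv_filter_bridge l 0 (by decide)
  have b1 := pv_filter_bridge l 1 (by decide)
  have b2 := pv_filter_bridge l 2 (by decide)
  have b3 := pv_filter_bridge l 3 (by decide)
  have b4 := pv_filter_bridge l 4 (by decide)
  have b5 := pv_filter_bridge l 5 (by decide)
  have b6 := pv_filter_bridge l 6 (by decide)
  have b7 := pv_filter_bridge l 7 (by decide)
  have b8 := pv_filter_bridge l 8 (by decide)
  have b9 := pv_filter_bridge l 9 (by decide)
  have b10 := pv_filter_bridge l 10 (by decide)
  have b11 := pv_filter_bridge l 11 (by decide)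
  simp only [pvSuffixes, List.getElem_cons_zero, List.getElem_cons_succ]
    at b0 b1 b2 b3 b4 b5 b6 b7 b8 b9 b10 b11
  simp only [PySem.List.foldl_append_if_eq_filter, List.nil_append]
  unfold pvBuckets
  have hlen : pvSuffixes.length = 12 := rfl
  have hr12 : List.range 12 = [0, 1, 2, 3, 4, 5, 6, 7, 8, 9, 10, 11] := by decide
  simp only [hlen, hr12, List.flatMap_cons, List.flatMap_nil, List.append_nil,
    List.filter_filter]
  rw [b0, b1, b2, b3, b4, b5, b6, b7, b8, b9, b10, b11]
  simp [List.append_assoc]
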